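-- pv_equiv track=rewrite | github.com/tunelko/ctf-2026 | EHAX_2026/reversing/pathfinder/solve.py | build_flag
-- ===== SOURCE A (Python) =====
-- def build_flag(path):
--     """RLE encode path and wrap in EHAX{...}"""
--     result = "EHAX{"
--     i = 0
--     while i < len(path):
--         ch = path[i]
--         count = 1
--         while i + count < len(path) and path[i + count] == ch:
--             count += 1
--         if count > 1:
--             result += f"{count}{ch}"
--         else:
--             result += ch
--         i += count
--     result += "}"
--     return result
-- ===== SOURCE B (Python) =====
-- def build_flag(path):
--     """RLE via run-boundary indices: collect the indices where a new run starts,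
--     then emit each run from consecutive boundary pairs."""
--     n = len(path)
--     bounds = [i for i in range(n) if i == 0 or path[i] != path[i - 1]] + [n]
--     body = "".join(
--         (str(j - i) if j - i > 1 else "") + path[i]
--         for i, j in zip(bounds, bounds[1:])
--     )
--     return "EHAX{" + body + "}"
-- ===== Notes on version B (the rewrite author's own statement) =====
-- stated objective: faster
-- what changed: Replaces A's nested index/count while-loops with repeated string concatenation by a staged construction: first collect the run-start boundary indices, then emit each run from consecutive boundary pairs (zip of the boundary list with its tail) joined once.
import Mathlib
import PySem

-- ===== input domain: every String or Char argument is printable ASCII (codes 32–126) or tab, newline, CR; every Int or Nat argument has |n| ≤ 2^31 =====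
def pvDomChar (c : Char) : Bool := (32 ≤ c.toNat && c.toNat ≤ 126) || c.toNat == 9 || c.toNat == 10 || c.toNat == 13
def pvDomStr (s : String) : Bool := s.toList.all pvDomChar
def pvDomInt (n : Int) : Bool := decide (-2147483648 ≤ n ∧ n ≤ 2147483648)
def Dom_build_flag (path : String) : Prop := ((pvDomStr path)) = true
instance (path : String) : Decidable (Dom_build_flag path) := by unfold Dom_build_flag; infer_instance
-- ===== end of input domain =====

-- B replaces A's nested index/count while-loops (with repeated string concatenation) by a
-- staged construction: collect the run-start boundary indices, then emit each run from
-- consecutive boundary pairs, joined once (objective: faster, measured).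

-- ===== PORT A =====
-- inner while loop: count how many further chars equal ch
def pvRunLenA (ch : Char) : List Char → Nat
  | [] => 0
  | c :: t => if c = ch then 1 + pvRunLenA ch t else 0

-- outer while loop: i < len(path) ↔ the remaining suffix is non-empty; i += count ↔ drop the run
def pvLoopA : List Char → String
  | [] => ""
  | ch :: t =>
      let count := 1 + pvRunLenA ch t
      (if count > 1 then toString count ++ ch.toString else ch.toString) ++
        pvLoopA (t.drop (pvRunLenA ch t))
  termination_by l => l.length
  decreasing_by simp

def build_flag (path : String) : String :=
  "EHAX{" ++ pvLoopA path.toList ++ "}"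

-- ===== PORT B =====
-- [i for i in range(n) if i == 0 or path[i] != path[i-1]]  (run-start indices)
def pvStartsB (l : List Char) : List Nat :=
  (List.range l.length).filter (fun i => i == 0 || !(l.getD i ' ' == l.getD (i - 1) ' '))

-- bounds = starts + [n]
def pvBoundsB (l : List Char) : List Nat := pvStartsB l ++ [l.length]

-- (str(j - i) if j - i > 1 else "") + path[i]
def pvPieceB (l : List Char) (p : Nat × Nat) : String :=
  (if p.2 - p.1 > 1 then toString (p.2 - p.1) else "") ++ (l.getD p.1 ' ').toString

-- "".join(... for i, j in zip(bounds, bounds[1:]))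
def pvBodyB (l : List Char) : String :=
  String.join (((pvBoundsB l).zip (pvBoundsB l).tail).map (pvPieceB l))

def build_flag_alt (path : String) : String :=
  "EHAX{" ++ pvBodyB path.toList ++ "}"

-- ===== PRECONDITION & SPEC =====
def Spec_build_flag (path : String) (out : String) : Prop := out = build_flag_alt path
instance (path : String) (out : String) : Decidable (Spec_build_flag path out) := by unfold Spec_build_flag; infer_instance

-- ===== CLAIM (what is proved, stated in full; the proofs are below) =====
def Claim_equal_build_flag : Prop := ∀ (path : String), Dom_build_flag path → Spec_build_flag path (build_flag path)

-- ===== LEMMAS AND PROOFS =====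
theorem pvRunLenA_eq_takeWhile (ch : Char) (l : List Char) :
    pvRunLenA ch l = (l.takeWhile (· = ch)).length := by
  induction l with
  | nil => rfl
  | cons c t ih =>
      simp only [pvRunLenA, List.takeWhile]
      by_cases h : c = ch <;> simp [h, ih]
      omega

theorem drop_takeWhile_length (p : Char → Bool) (l : List Char) :
    l.drop (l.takeWhile p).length = l.dropWhile p := by
  induction l with
  | nil => rfl
  | cons c t ih =>
      by_cases h : p c <;> simp [List.takeWhile, List.dropWhile, h, ih]

theorem pv_foldl_str (xs : List String) (a : String) :
    xs.foldl (· ++ ·) a = a ++ xs.foldl (· ++ ·) "" := by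
  induction xs generalizing a with
  | nil => simp
  | cons x t ih =>
      simp only [List.foldl_cons]
      rw [ih, ih ("" ++ x)]
      simp [String.append_assoc]

theorem pv_join_cons (x : String) (xs : List String) :
    String.join (x :: xs) = x ++ String.join xs := by
  simp only [String.join, List.foldl_cons]
  rw [pv_foldl_str]
  simp

-- every index inside the leading run (prefix of length r.length+1) reads c
theorem pv_getD_run (c : Char) (r s : List Char) (hc : ∀ x ∈ r, x = c)
    (i : Nat) (hi : i ≤ r.length) :
    (c :: (r ++ s)).getD i ' ' = c := by
  cases i with
  | zero => rfl
  | succ j =>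
      have hj : j < r.length := Nat.lt_of_succ_le hi
      have : (r ++ s).getD j ' ' = r.getD j ' ' := by
        simp [List.getD, List.getElem?_append_left hj]
      simp only [List.getD_cons_succ, this, List.getD_eq_getElem r ' ' hj]
      exact hc _ (List.getElem_mem hj)

-- suffix indices read from s
theorem pv_getD_shift (c : Char) (r s : List Char) (j : Nat) :
    (c :: (r ++ s)).getD (r.length + 1 + j) ' ' = s.getD j ' ' := by
  calc (c :: (r ++ s)).getD (r.length + 1 + j) ' '
      = ((c :: r) ++ s).getD (r.length + 1 + j) ' ' := by rw [List.cons_append]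
    _ = s.getD (r.length + 1 + j - (c :: r).length) ' ' :=
        List.getD_append_right _ _ _ _ (by simp [List.length_cons])
    _ = s.getD j ' ' := by rw [List.length_cons, Nat.add_sub_cancel_left]

theorem pv_starts_cons (c : Char) (t : List Char) :
    pvStartsB (c :: t) =
      0 :: (pvStartsB (t.dropWhile (· = c))).map (((t.takeWhile (· = c)).length + 1) + ·) := by
  set r := t.takeWhile (· = c) with hr
  set s := t.dropWhile (· = c) with hs
  have hrs : r ++ s = t := List.takeWhile_append_dropWhile
  have hc : ∀ x ∈ r, x = c := by
    intro x hx
    have := List.mem_takeWhile_imp hx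
    simpa using this
  have hlen : (c :: t).length = (r.length + 1) + s.length := by
    simp [← hrs]; omega
  have hrun : ∀ i, i ≤ r.length → (c :: t).getD i ' ' = c := by
    intro i hi; rw [← hrs]; exact pv_getD_run c r s hc i hi
  have hshift : ∀ j, (c :: t).getD (r.length + 1 + j) ' ' = s.getD j ' ' := by
    intro j; rw [← hrs]; exact pv_getD_shift c r s j
  unfold pvStartsB
  rw [hlen, List.range_add, List.filter_append, List.filter_map]
  have hleft : (List.range (r.length + 1)).filter
      (fun i => i == 0 || !((c :: t).getD i ' ' == (c :: t).getD (i - 1) ' ')) = [0] := by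
    rw [List.range_succ_eq_map, List.filter_cons_of_pos (by simp), List.filter_map]
    have hnil : (List.range r.length).filter
        ((fun i => i == 0 || !((c :: t).getD i ' ' == (c :: t).getD (i - 1) ' ')) ∘ Nat.succ)
        = [] := by
      rw [List.filter_eq_nil_iff]
      intro j hj
      have hj' : j < r.length := List.mem_range.mp hj
      have h1 : (c :: t).getD (j + 1) ' ' = c := hrun _ (by omega)
      have h2 : (c :: t).getD (j + 1 - 1) ' ' = c := by simpa using hrun j (by omega)
      show ¬(j + 1 == 0 ||
        !((c :: t).getD (j + 1) ' ' == (c :: t).getD (j + 1 - 1) ' ')) = true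
      rw [h1, h2]
      simp
    rw [hnil]
    rfl
  have hright : (List.range s.length).filter
      ((fun i => i == 0 || !((c :: t).getD i ' ' == (c :: t).getD (i - 1) ' ')) ∘
        (fun x => r.length + 1 + x))
      = (List.range s.length).filter
        (fun i => i == 0 || !(s.getD i ' ' == s.getD (i - 1) ' ')) := by
    apply List.filter_congr
    intro j hj
    have hj' : j < s.length := List.mem_range.mp hj
    simp only [Function.comp]
    cases j with
    | zero =>
        have hne' : s ≠ [] := by
          intro h; rw [h] at hj'; simp at hj'
        have hhead : s.getD 0 ' ' ≠ c := by
          obtain ⟨d, s', heq⟩ := List.exists_cons_of_ne_nil hne'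
          have hne2 : t.dropWhile (· = c) ≠ [] := by rw [← hs]; exact hne'
          have hnot := List.head_dropWhile_not (· = c) hne2
          have hd : (t.dropWhile (· = c)).head hne2 = d := by
            simp [show t.dropWhile (· = c) = d :: s' from hs ▸ heq]
          rw [hd] at hnot
          rw [heq]
          simp only [List.getD_cons_zero]
          simpa using hnot
        have h1 : (c :: t).getD (r.length + 1 + 0) ' ' = s.getD 0 ' ' := hshift 0
        have h2 : (c :: t).getD (r.length + 1 + 0 - 1) ' ' = c := by
          simpa using hrun r.length (by omega)
        have hb : (s.getD 0 ' ' == c) = false := beq_eq_false_iff_ne.mpr hhead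
        show (r.length + 1 + 0 == 0 ||
            !((c :: t).getD (r.length + 1 + 0) ' ' == (c :: t).getD (r.length + 1 + 0 - 1) ' '))
          = (0 == 0 || !(s.getD 0 ' ' == s.getD (0 - 1) ' '))
        rw [h1, h2, hb]
        simp
    | succ k =>
        have h1 : (c :: t).getD (r.length + 1 + (k + 1)) ' ' = s.getD (k + 1) ' ' :=
          hshift (k + 1)
        have h2 : (c :: t).getD (r.length + 1 + (k + 1) - 1) ' ' = s.getD k ' ' := by
          have := hshift k
          rw [show r.length + 1 + (k + 1) - 1 = r.length + 1 + k by omega]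
          exact this
        show (r.length + 1 + (k + 1) == 0 ||
            !((c :: t).getD (r.length + 1 + (k + 1)) ' ' == (c :: t).getD (r.length + 1 + (k + 1) - 1) ' '))
          = (k + 1 == 0 || !(s.getD (k + 1) ' ' == s.getD (k + 1 - 1) ' '))
        rw [h1, h2]
        simp
  rw [hleft, hright]
  rfl

theorem pv_bounds_cons (c : Char) (t : List Char) :
    pvBoundsB (c :: t) =
      0 :: (pvBoundsB (t.dropWhile (· = c))).map (((t.takeWhile (· = c)).length + 1) + ·) := by
  have h := congrArg List.length (List.takeWhile_append_dropWhile (p := (· = c)) (l := t))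
  simp only [List.length_append] at h
  unfold pvBoundsB
  rw [pv_starts_cons]
  have hlen : (c :: t).length =
      ((t.takeWhile (· = c)).length + 1) + (t.dropWhile (· = c)).length := by
    simp [List.length_cons]; omega
  rw [hlen]
  simp [List.map_append]

theorem pv_bounds_head : ∀ l : List Char, ∃ bs, pvBoundsB l = 0 :: bs
  | [] => ⟨[], by simp [pvBoundsB, pvStartsB]⟩
  | c :: t => ⟨_, pv_bounds_cons c t⟩

theorem pv_piece_shift (c : Char) (t : List Char) (m i j : Nat)
    (hm : m = (t.takeWhile (· = c)).length + 1) :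
    pvPieceB (c :: t) (m + i, m + j) = pvPieceB (t.dropWhile (· = c)) (i, j) := by
  set r := t.takeWhile (· = c)
  set s := t.dropWhile (· = c)
  have hrs : r ++ s = t := List.takeWhile_append_dropWhile
  have hget : (c :: t).getD (m + i) ' ' = s.getD i ' ' := by
    rw [← hrs, hm]; exact pv_getD_shift c r s i
  simp only [pvPieceB, show m + j - (m + i) = j - i by omega, hget]

theorem pv_body_cons (c : Char) (t : List Char) :
    pvBodyB (c :: t) =
      ((if (t.takeWhile (· = c)).length + 1 > 1
          then toString ((t.takeWhile (· = c)).length + 1) else "") ++ c.toString) ++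
        pvBodyB (t.dropWhile (· = c)) := by
  set m := (t.takeWhile (· = c)).length + 1 with hm
  obtain ⟨bs, hbs⟩ := pv_bounds_head (t.dropWhile (· = c))
  unfold pvBodyB
  rw [pv_bounds_cons, ← hm, hbs]
  simp only [List.map_cons, List.tail_cons, Nat.add_zero]
  rw [List.zip_cons_cons, List.map_cons, pv_join_cons]
  congr 1
  have : (m :: bs.map (m + ·)).zip (bs.map (m + ·)) =
      ((0 :: bs).map (m + ·)).zip (bs.map (m + ·)) := by
    simp only [List.map_cons, Nat.add_zero]
  rw [this, List.zip_map, List.map_map]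
  refine congrArg String.join (List.map_congr_left ?_)
  intro p _
  cases p with
  | mk i j => exact pv_piece_shift c t m i j hm

theorem pv_loop_eq_body : ∀ l : List Char, pvLoopA l = pvBodyB l
  | [] => by simp [pvLoopA, pvBodyB, pvBoundsB, pvStartsB, String.join]
  | c :: t => by
      rw [pvLoopA, pvRunLenA_eq_takeWhile, drop_takeWhile_length,
        pv_loop_eq_body (t.dropWhile (· = c)), pv_body_cons]
      congr 1
      rw [Nat.add_comm 1 (t.takeWhile (· = c)).length]
      split
      · rfl
      · rfl
  termination_by l => l.length
  decreasing_by simp; exact List.length_dropWhile_le _ _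

-- ===== VERDICT (by name: the statement is the Claim_ definition above) =====
theorem build_flag_spec : Claim_equal_build_flag := by
  intro path _
  unfold Spec_build_flag build_flag build_flag_alt
  rw [pv_loop_eq_body]
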